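-- pv_equiv track=rewrite | github.com/VRER1997/leetcode_python | easy/205 Isomorphic Strings.py | getPatten
-- ===== SOURCE A (Python) =====
-- def getPatten(s):
--     dct, p, cnt = {}, '', 0
--     for char in s:
--         if char not in dct:
--             dct[char] = cnt
--             cnt += 1
--         p += str(dct[char])
--     return p
-- ===== SOURCE B (Python) =====
-- def getPatten(s):
--     order = sorted(set(s), key=s.index)
--     mapping = {c: i for i, c in enumerate(order)}
--     return ''.join(str(mapping[c]) for c in s)
-- ===== Notes on version B (the rewrite author's own statement) =====
-- stated objective: idiomatic
-- what changed: B replaces A's single incremental scan with a running counter and growing string by an index-first pipeline: sort the distinct characters by first-occurrence index, build the rank dict once by comprehension, then map-join over s.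
import Mathlib
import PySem

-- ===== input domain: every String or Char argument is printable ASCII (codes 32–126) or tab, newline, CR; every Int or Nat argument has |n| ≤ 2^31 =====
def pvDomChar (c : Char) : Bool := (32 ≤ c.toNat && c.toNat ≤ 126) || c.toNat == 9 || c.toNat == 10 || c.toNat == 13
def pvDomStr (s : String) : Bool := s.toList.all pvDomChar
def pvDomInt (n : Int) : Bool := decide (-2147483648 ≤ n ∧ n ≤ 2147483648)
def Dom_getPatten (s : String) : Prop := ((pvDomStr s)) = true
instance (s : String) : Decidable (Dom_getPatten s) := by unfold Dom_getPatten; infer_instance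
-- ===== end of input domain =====

-- B replaces A's incremental scan (running counter, growing string) with an index-first
-- pipeline: sort the distinct characters by first occurrence, build the rank dict once,
-- then map-join over s; objective: more idiomatic, not faster.

-- ===== PORT A =====
-- A's growing string p is carried as a List Char (Python string concatenation), built back
-- into a String at the end.
def getPatten (s : String) : String :=
  let final := s.toList.foldl
    (fun (st : PySem.Dict Char Int × List Char × Int) ch =>
      let dct := st.1
      let p := st.2.1
      let cnt := st.2.2
      let dct' := if dct.contains ch then dct else dct.insert ch cnt
      let cnt' := if dct.contains ch then cnt else cnt + 1
      (dct', p ++ PySem.Int.toChars (dct'.getD ch 0), cnt'))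
    (PySem.Dict.empty, [], 0)
  String.ofList final.2.1

-- ===== PORT B =====
-- sorted(set(s), key=s.index): key ported as first-occurrence index (always present here);
-- the dict comprehension is the insert-fold over enumerate(order).
def getPatten_alt (s : String) : String :=
  let xs := s.toList
  let order := PySem.List.sorted (PySem.Set.ofList xs)
                 (fun c => (PySem.List.index? xs c).getD 0)
  let mapping : PySem.Dict Char Int :=
    (PySem.List.enumerate order 0).foldl (fun d p => d.insert p.2 p.1) PySem.Dict.empty
  PySem.Str.join "" (xs.map (fun c => PySem.Int.toStr (mapping.getD c 0)))

-- ===== PRECONDITION & SPEC =====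
def Spec_getPatten (s : String) (out : String) : Prop := out = getPatten_alt s
instance (s : String) (out : String) : Decidable (Spec_getPatten s out) := by unfold Spec_getPatten; infer_instance

-- ===== CLAIM (what is proved, stated in full; the proofs are below) =====
def Claim_equal_getPatten : Prop := ∀ (s : String), Dom_getPatten s → Spec_getPatten s (getPatten s)

-- ===== LEMMAS AND PROOFS =====

-- first-occurrence index of c in xs (the sort key of B)
def pvFidx (xs : List Char) (c : Char) : Nat := (PySem.List.index? xs c).getD 0

-- the canonical rank dict with items [(d0,0),(d1,1),…] for a distinct-character list l
def pvDmk (l : List Char) : PySem.Dict Char Int :=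
  PySem.Dict.mk ((PySem.List.enumerate l 0).map (fun p => (p.2, p.1)))

lemma pvFidx_append_of_mem (xs t : List Char) (c : Char) (h : c ∈ xs) :
    pvFidx (xs ++ t) c = pvFidx xs c := by
  unfold pvFidx
  rw [PySem.List.index?_append_of_mem t h]

lemma pvFidx_lt_length (xs : List Char) (c : Char) (h : c ∈ xs) :
    pvFidx xs c < xs.length := by
  have h1 : (PySem.List.index? xs c).isSome := (PySem.List.index?_isSome_iff xs c).mpr h
  obtain ⟨k, hk⟩ := Option.isSome_iff_exists.mp h1
  obtain ⟨hlt, -, -⟩ := PySem.List.getElem_of_index?_eq_some hk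
  unfold pvFidx
  rw [hk]
  exact hlt

-- distinct characters in first-appearance order carry strictly increasing first indices
lemma pvPairwise_fidx (xs : List Char) :
    (PySem.Set.ofList xs).Pairwise (fun a b => pvFidx xs a < pvFidx xs b) := by
  induction xs using List.reverseRecOn with
  | nil => simp [PySem.Set.ofList]
  | append_singleton xs c ih =>
    have hof : PySem.Set.ofList (xs ++ [c]) = PySem.Set.add (PySem.Set.ofList xs) c := by
      simp [PySem.Set.ofList_eq_foldl, List.foldl_append]
    by_cases hc : c ∈ xs
    · have hmem : PySem.Set.contains (PySem.Set.ofList xs) c = true := by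
        simp [PySem.Set.mem_ofList, hc]
      rw [hof, PySem.Set.add, hmem, if_pos rfl]
      refine ih.imp_of_mem ?_
      intro a b ha hb hab
      have ha' : a ∈ xs := (PySem.Set.mem_ofList xs a).mp ha
      have hb' : b ∈ xs := (PySem.Set.mem_ofList xs b).mp hb
      rwa [pvFidx_append_of_mem xs [c] a ha', pvFidx_append_of_mem xs [c] b hb']
    · have hmem : PySem.Set.contains (PySem.Set.ofList xs) c = false := by
        simp [PySem.Set.mem_ofList, hc]
      rw [hof, PySem.Set.add, hmem]
      simp only [Bool.false_eq_true, if_false]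
      rw [List.pairwise_append]
      refine ⟨?_, by simp, ?_⟩
      · refine ih.imp_of_mem ?_
        intro a b ha hb hab
        have ha' : a ∈ xs := (PySem.Set.mem_ofList xs a).mp ha
        have hb' : b ∈ xs := (PySem.Set.mem_ofList xs b).mp hb
        rwa [pvFidx_append_of_mem xs [c] a ha', pvFidx_append_of_mem xs [c] b hb']
      · intro a ha b hb
        have ha' : a ∈ xs := (PySem.Set.mem_ofList xs a).mp ha
        have hbc : b = c := by simpa using hb
        rw [hbc]
        rw [pvFidx_append_of_mem xs [c] a ha']
        have hlenc : pvFidx (xs ++ [c]) c = xs.length := by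
          unfold pvFidx
          rw [PySem.List.index?_append_singleton_self xs c hc]
          rfl
        rw [hlenc]
        exact pvFidx_lt_length xs a ha'

-- B's sort is the identity on the first-appearance order
lemma pvSorted_eq (xs : List Char) :
    PySem.List.sorted (PySem.Set.ofList xs) (fun c => pvFidx xs c) = PySem.Set.ofList xs :=
  PySem.List.sorted_eq_of_perm_of_pairwise_lt _ _ _ (List.Perm.refl _) (pvPairwise_fidx xs)

lemma pvDmk_keys (l : List Char) : (pvDmk l).keys = l := by
  show (((PySem.List.enumerate l 0).map (fun p => (p.2, p.1))).map Prod.fst) = l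
  rw [List.map_map]
  simp [Function.comp_def, PySem.List.map_snd_enumerate l 0]

lemma pvDmk_contains (l : List Char) (c : Char) :
    (pvDmk l).contains c = decide (c ∈ l) := by
  rw [PySem.Dict.contains_eq_decide_mem_keys, pvDmk_keys]

-- getD on the rank dict is the index in l
lemma pvDmk_getD (l : List Char) (c : Char) (hnd : l.Nodup) (k : Nat)
    (hk : k < l.length) (hc : l[k] = c) :
    (pvDmk l).getD c 0 = (k : Int) := by
  have hmem : (c, (k : Int)) ∈ (pvDmk l).items := by
    simp only [pvDmk]
    refine List.mem_map.mpr ⟨((k : Int), c), ?_, rfl⟩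
    exact (PySem.List.mem_enumerate_iff l 0 _).mpr ⟨k, hk, by simp [hc]⟩
  exact PySem.Dict.getD_of_mem_items _ hmem (by rw [pvDmk_keys]; exact hnd) 0

-- insertion of a fresh character at rank l.length extends the rank dict
lemma pvDmk_insert (l : List Char) (c : Char) (hc : c ∉ l) :
    (pvDmk l).insert c (l.length : Int) = pvDmk (l ++ [c]) := by
  apply PySem.Dict.ext
  rw [PySem.Dict.items_insert_of_not_contains _ _ (by rw [pvDmk_contains l c]; exact decide_eq_false hc)]
  simp [pvDmk, PySem.List.enumerate_append]

lemma pvDedup_append_singleton (xs : List Char) (c : Char) :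
    PySem.List.dedup (xs ++ [c]) =
      if c ∈ PySem.List.dedup xs then PySem.List.dedup xs else PySem.List.dedup xs ++ [c] := by
  simp only [PySem.List.dedup_eq_ofList, PySem.Set.ofList_eq_foldl, List.foldl_append,
    List.foldl_cons, List.foldl_nil]
  rw [← PySem.Set.ofList_eq_foldl]
  by_cases hc : c ∈ PySem.Set.ofList xs
  · simp [PySem.Set.add, hc]
  · simp [PySem.Set.add, hc]

-- the per-character rank: index of c in dedup of the whole string
def pvRank (xs : List Char) (c : Char) : Int := ((PySem.List.dedup xs).idxOf c : Int)

lemma pvRank_stable (pre t : List Char) (c : Char) (h : c ∈ PySem.List.dedup pre) :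
    pvRank (pre ++ t) c = pvRank pre c := by
  induction t generalizing pre with
  | nil => simp
  | cons b t ih =>
    have hsplit : pre ++ b :: t = (pre ++ [b]) ++ t := by simp
    have h' : c ∈ pre := (PySem.List.mem_dedup pre c).mp h
    rw [hsplit, ih (pre ++ [b])]
    · unfold pvRank
      rw [pvDedup_append_singleton]
      split_ifs with hb
      · rfl
      · norm_cast
        exact List.idxOf_append_of_mem h
    · rw [pvDedup_append_singleton]
      split_ifs with hb
      · exact h
      · exact List.mem_append_left _ h

lemma pvRank_getD (pre : List Char) (c : Char) (h : c ∈ PySem.List.dedup pre) :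
    (pvDmk (PySem.List.dedup pre)).getD c 0 = pvRank pre c := by
  have hnd := PySem.List.nodup_dedup pre
  have hk : (PySem.List.dedup pre).idxOf c < (PySem.List.dedup pre).length :=
    List.idxOf_lt_length_of_mem h
  exact pvDmk_getD _ c hnd _ hk (List.getElem_idxOf hk)

-- the loop invariant of A's fold
lemma pvFoldA (xs : List Char) : ∀ (pre p0 : List Char),
    xs.foldl
      (fun (st : PySem.Dict Char Int × List Char × Int) ch =>
        let dct := st.1
        let p := st.2.1
        let cnt := st.2.2
        let dct' := if dct.contains ch then dct else dct.insert ch cnt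
        let cnt' := if dct.contains ch then cnt else cnt + 1
        (dct', p ++ PySem.Int.toChars (dct'.getD ch 0), cnt'))
      (pvDmk (PySem.List.dedup pre), p0, ((PySem.List.dedup pre).length : Int))
    = (pvDmk (PySem.List.dedup (pre ++ xs)),
       p0 ++ (xs.map (fun c => PySem.Int.toChars (pvRank (pre ++ xs) c))).flatten,
       ((PySem.List.dedup (pre ++ xs)).length : Int)) := by
  induction xs with
  | nil => intro pre p0; simp
  | cons ch t ih =>
    intro pre p0
    have hnd := PySem.List.nodup_dedup pre
    have hassoc : pre ++ ch :: t = (pre ++ [ch]) ++ t := by simp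
    by_cases hc : ch ∈ PySem.List.dedup pre
    · have hcont : (pvDmk (PySem.List.dedup pre)).contains ch = true := by
        rw [pvDmk_contains]
        exact decide_eq_true hc
      have hded : PySem.List.dedup (pre ++ [ch]) = PySem.List.dedup pre := by
        rw [pvDedup_append_singleton, if_pos hc]
      simp only [List.foldl_cons, hcont, if_true]
      rw [pvRank_getD pre ch hc]
      have := ih (pre ++ [ch]) (p0 ++ PySem.Int.toChars (pvRank pre ch))
      rw [hded] at this
      rw [this, ← hassoc]
      have hr : pvRank (pre ++ ch :: t) ch = pvRank pre ch := by
        rw [hassoc, pvRank_stable (pre ++ [ch]) t ch (by rw [hded]; exact hc)]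
        unfold pvRank
        rw [hded]
      simp [hr]
    · have hcont : (pvDmk (PySem.List.dedup pre)).contains ch = false := by
        rw [pvDmk_contains]
        exact decide_eq_false hc
      have hded : PySem.List.dedup (pre ++ [ch]) = PySem.List.dedup pre ++ [ch] := by
        rw [pvDedup_append_singleton, if_neg hc]
      have hins := pvDmk_insert (PySem.List.dedup pre) ch hc
      simp only [List.foldl_cons, hcont, if_false, Bool.false_eq_true]
      rw [hins, ← hded]
      have hmem : ch ∈ PySem.List.dedup (pre ++ [ch]) := by rw [hded]; simp
      rw [pvRank_getD (pre ++ [ch]) ch hmem]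
      have := ih (pre ++ [ch]) (p0 ++ PySem.Int.toChars (pvRank (pre ++ [ch]) ch))
      have hlen : ((PySem.List.dedup pre).length : Int) + 1
          = ((PySem.List.dedup (pre ++ [ch])).length : Int) := by
        rw [hded]
        simp [List.length_append]
      rw [hlen, this, ← hassoc]
      have hr : pvRank (pre ++ ch :: t) ch = pvRank (pre ++ [ch]) ch := by
        rw [hassoc, pvRank_stable _ t ch hmem]
      simp [hr]

-- closed form of A
lemma pvA_closed (s : String) :
    getPatten s = String.ofList ((s.toList.map (fun c => PySem.Int.toChars (pvRank s.toList c))).flatten) := by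
  unfold getPatten
  have h0 : (PySem.Dict.empty : PySem.Dict Char Int) = pvDmk (PySem.List.dedup []) := rfl
  have := pvFoldA s.toList [] []
  simp only [List.nil_append] at this
  simp only [h0]
  have hlen : ((PySem.List.dedup ([] : List Char)).length : Int) = 0 := rfl
  rw [hlen] at this
  rw [this]

-- the mapping dict of B is the canonical rank dict of dedup(s)
lemma pvB_mapping (xs : List Char) :
    (PySem.List.enumerate (PySem.Set.ofList xs) 0).foldl
        (fun (d : PySem.Dict Char Int) p => d.insert p.2 p.1) PySem.Dict.empty
      = pvDmk (PySem.List.dedup xs) := by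
  apply PySem.Dict.ext
  have hnd : ((PySem.List.enumerate (PySem.Set.ofList xs) 0).map (fun p => p.2)).Nodup := by
    rw [PySem.List.map_snd_enumerate, ← PySem.List.dedup_eq_ofList]
    exact PySem.List.nodup_dedup xs
  have h := PySem.Dict.items_foldl_insert_fresh
      (PySem.List.enumerate (PySem.Set.ofList xs) 0) (fun p => p.2) (fun p => p.1)
      PySem.Dict.empty (fun a _ => rfl) hnd
  simpa [pvDmk, PySem.List.dedup_eq_ofList] using h

-- Chars.join with empty separator is flatten
lemma pvJoin_nil_flatten (css : List (List Char)) :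
    PySem.Chars.join [] css = css.flatten := by
  induction css with
  | nil => simp [PySem.Chars.join_nil]
  | cons p rest ih =>
    cases rest with
    | nil => simp [PySem.Chars.join, List.intercalate]
    | cons q r =>
      rw [PySem.Chars.join_cons_cons, ih]
      simp

-- closed form of B
lemma pvB_closed (s : String) :
    getPatten_alt s = String.ofList ((s.toList.map (fun c => PySem.Int.toChars (pvRank s.toList c))).flatten) := by
  unfold getPatten_alt
  simp only []
  have hsort : PySem.List.sorted (PySem.Set.ofList s.toList)
      (fun c => (PySem.List.index? s.toList c).getD 0) = PySem.Set.ofList s.toList :=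
    pvSorted_eq s.toList
  rw [hsort, pvB_mapping s.toList]
  apply String.ext
  rw [PySem.Str.toList_join]
  have : String.toList "" = ([] : List Char) := rfl
  rw [this, List.map_map]
  rw [pvJoin_nil_flatten]
  simp only [String.toList_ofList]
  congr 1
  apply List.map_congr_left
  intro c hc
  have hcd : c ∈ PySem.List.dedup s.toList := by
    rw [PySem.List.dedup_eq_ofList]; exact (PySem.Set.mem_ofList _ c).mpr hc
  simp only [Function.comp_def]
  rw [pvRank_getD s.toList c hcd, PySem.Int.toList_toStr]

-- ===== VERDICT (by name: the statement is the Claim_ definition above) =====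
theorem getPatten_spec : Claim_equal_getPatten := by
  intro s _
  unfold Spec_getPatten
  rw [pvA_closed s, pvB_closed s]
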